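-- pv_equiv track=rewrite | github.com/jmcontreras2/CS2302 | Lab1-Recursion.py | permutations2p1
-- ===== SOURCE A (Python) =====
-- def permutations2p1(unchosenCharacters, chosenCharacters, userWord):
--     if len(unchosenCharacters) == 0:
--         if chosenCharacters != userWord:
--             return [chosenCharacters]
--         else:
--             return []
--     else:
--         # The recursive case happens only if the character that is going to be passed to continue the permutation is not already
--         # in the permutation in process.
--         permutations = []
--         for i in range(len(unchosenCharacters)):
--             chosenLettertoPass =unchosenCharacters[i]
--             if chosenLettertoPass in chosenCharacters:
--                 pass
--             else:
--                 unchosenLetterstoPass = unchosenCharacters[:i] + unchosenCharacters[i + 1:]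
--                 permutations += (permutations2p1(unchosenLetterstoPass, chosenCharacters + chosenLettertoPass, userWord))
--         ### We return the final list of anagrams when anagramFinder is finished.
--     return permutations
-- ===== SOURCE B (Python) =====
-- def permutations2p1(unchosenCharacters, chosenCharacters, userWord):
--     # Iterative DFS over an explicit stack instead of recursion; same output order.
--     result = []
--     stack = [(unchosenCharacters, chosenCharacters)]
--     while stack:
--         u, c = stack.pop()
--         if not u:
--             if c != userWord:
--                 result.append(c)
--         else:
--             children = [(u[:i] + u[i+1:], c + u[i])
--                         for i in range(len(u)) if u[i] not in c]
--             stack.extend(reversed(children))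
--     return result
-- ===== Notes on version B (the rewrite author's own statement) =====
-- stated objective: alternative
-- what changed: Replaces the recursive backtracking (recursion + for-loop accumulating sublists) by an iterative depth-first search over an explicit stack of (unchosen, chosen) states, appending completed words to a result list; children are pushed in reverse so the emission order is identical.
import Mathlib
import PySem

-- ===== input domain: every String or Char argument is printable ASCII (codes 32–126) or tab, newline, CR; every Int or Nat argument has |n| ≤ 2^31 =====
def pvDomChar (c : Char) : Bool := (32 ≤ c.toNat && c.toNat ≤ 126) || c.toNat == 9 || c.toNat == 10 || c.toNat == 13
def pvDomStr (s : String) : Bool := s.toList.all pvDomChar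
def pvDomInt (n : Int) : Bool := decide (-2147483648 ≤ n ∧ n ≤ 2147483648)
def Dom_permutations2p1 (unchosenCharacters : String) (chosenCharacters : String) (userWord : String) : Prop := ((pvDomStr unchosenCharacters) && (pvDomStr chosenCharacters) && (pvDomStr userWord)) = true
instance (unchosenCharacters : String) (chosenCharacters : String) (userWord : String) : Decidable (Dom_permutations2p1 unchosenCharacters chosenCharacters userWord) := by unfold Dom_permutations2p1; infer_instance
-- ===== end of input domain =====

-- B replaces A's recursive backtracking by an iterative DFS with an explicit stack (alternative decomposition, same cost).
-- Both ports work on List Char (PySem chars convention) and are total.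

-- ===== PORT A =====
-- A's recursion always passes a string one character shorter, so fuel = length of
-- unchosenCharacters makes the recursion structural; the fuel-0 branch is unreachable
-- from the wrapper (a totality guard only).
def permutations2p1Core : Nat → List Char → List Char → List Char → List String
  | fuel, u, c, w =>
    if u.length = 0 then
      (if String.ofList c ≠ String.ofList w then [String.ofList c] else [])
    else
      match fuel with
      | 0 => []
      | fuel' + 1 =>
        (List.range u.length).foldl
          (fun perms i =>
            if c.contains (u.getD i ' ') then perms
            else perms ++ permutations2p1Core fuel' (u.take i ++ u.drop (i+1)) (c ++ [u.getD i ' ']) w)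
          []

def permutations2p1 (unchosenCharacters : String) (chosenCharacters : String) (userWord : String) : List String :=
  permutations2p1Core unchosenCharacters.toList.length unchosenCharacters.toList chosenCharacters.toList userWord.toList

-- ===== PORT B =====
-- children of a state: the comprehension from Source B
def pvChildren (u c : List Char) : List (List Char × List Char) :=
  (List.range u.length).filterMap
    (fun i => if c.contains (u.getD i ' ') then none
              else some (u.take i ++ u.drop (i+1), c ++ [u.getD i ' ']))

-- stack measure used only for termination of the DFS loop
def pvMeas (st : List (List Char × List Char)) : Nat :=
  (st.map (fun s => (s.1.length + 1).factorial)).sum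

theorem pvChildren_len {u c : List Char} {x : List Char × List Char} (hx : x ∈ pvChildren u c) :
    x.1.length + 1 = u.length := by
  simp only [pvChildren, List.mem_filterMap, List.mem_range] at hx
  obtain ⟨i, hi, hsome⟩ := hx
  split_ifs at hsome with h
  obtain rfl := Option.some.inj hsome
  simp [List.length_take, List.length_drop]
  omega

theorem pvMeas_children_lt (u c : List Char) (st : List (List Char × List Char)) (hu : ¬ u = []) :
    pvMeas (pvChildren u c ++ st) < pvMeas ((u, c) :: st) := by
  have hlen : 1 ≤ u.length := by
    cases u with
    | nil => exact absurd rfl hu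
    | cons a t => simp
  have hchild : pvMeas (pvChildren u c) ≤ u.length * u.length.factorial := by
    have hbd : ∀ y ∈ (pvChildren u c).map (fun s => (s.1.length + 1).factorial),
        y ≤ u.length.factorial := by
      intro y hy
      simp only [List.mem_map] at hy
      obtain ⟨x, hx, rfl⟩ := hy
      rw [pvChildren_len hx]
    have h1 : pvMeas (pvChildren u c) ≤
        ((pvChildren u c).map (fun s => (s.1.length + 1).factorial)).length * u.length.factorial := by
      simpa [pvMeas] using List.sum_le_card_nsmul _ _ hbd
    have h2 : (pvChildren u c).length ≤ u.length := by
      have := List.length_filterMap_le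
        (fun i => if c.contains (u.getD i ' ') then none
              else some (u.take i ++ u.drop (i+1), c ++ [u.getD i ' ']))
        (List.range u.length)
      simpa [pvChildren] using this
    calc pvMeas (pvChildren u c)
        ≤ (pvChildren u c).length * u.length.factorial := by simpa using h1
      _ ≤ u.length * u.length.factorial := Nat.mul_le_mul_right _ h2
  have hfac : u.length * u.length.factorial < (u.length + 1).factorial := by
    rw [Nat.factorial_succ]
    exact (Nat.mul_lt_mul_right u.length.factorial_pos).mpr (by omega)
  have happ : pvMeas (pvChildren u c ++ st) = pvMeas (pvChildren u c) + pvMeas st := by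
    simp [pvMeas]
  have hcons : pvMeas ((u, c) :: st) = (u.length + 1).factorial + pvMeas st := by
    simp [pvMeas]
  omega

-- the DFS loop from Source B: pop a state, emit or push its children (in pop order)
def pvRunB (w : List Char) : List (List Char × List Char) → List String → List String
  | [], acc => acc
  | (u, c) :: st, acc =>
    if h : u = [] then
      pvRunB w st (if String.ofList c ≠ String.ofList w then acc ++ [String.ofList c] else acc)
    else
      pvRunB w (pvChildren u c ++ st) acc
termination_by st _ => pvMeas st
decreasing_by
  · simp [h, pvMeas, Nat.factorial]
  · exact pvMeas_children_lt u c st h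

def permutations2p1_alt (unchosenCharacters : String) (chosenCharacters : String) (userWord : String) : List String :=
  pvRunB userWord.toList [(unchosenCharacters.toList, chosenCharacters.toList)] []

-- ===== PRECONDITION & SPEC =====
def Spec_permutations2p1 (unchosenCharacters : String) (chosenCharacters : String) (userWord : String) (out : List String) : Prop := out = permutations2p1_alt unchosenCharacters chosenCharacters userWord
instance (unchosenCharacters : String) (chosenCharacters : String) (userWord : String) (out : List String) : Decidable (Spec_permutations2p1 unchosenCharacters chosenCharacters userWord out) := by unfold Spec_permutations2p1; infer_instance

-- ===== CLAIM (what is proved, stated in full; the proofs are below) =====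
def Claim_equal_permutations2p1 : Prop := ∀ (unchosenCharacters : String) (chosenCharacters : String) (userWord : String), Dom_permutations2p1 unchosenCharacters chosenCharacters userWord → Spec_permutations2p1 unchosenCharacters chosenCharacters userWord (permutations2p1 unchosenCharacters chosenCharacters userWord)

-- ===== LEMMAS AND PROOFS =====

theorem pvRunB_nil (w : List Char) (acc : List String) : pvRunB w [] acc = acc := by
  rw [pvRunB]

theorem pvRunB_cons_nil (w c : List Char) (st : List (List Char × List Char)) (acc : List String) :
    pvRunB w (([], c) :: st) acc
      = pvRunB w st (if String.ofList c ≠ String.ofList w then acc ++ [String.ofList c] else acc) := by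
  rw [pvRunB]; simp

theorem pvRunB_cons (w u c : List Char) (st : List (List Char × List Char)) (acc : List String)
    (hu : ¬ u = []) :
    pvRunB w ((u, c) :: st) acc = pvRunB w (pvChildren u c ++ st) acc := by
  rw [pvRunB]; simp [hu]

-- the loop body is append-structured: the accumulator factors out
theorem pv_foldl_factor {β : Type} (cond : β → Bool) (h : β → List String) :
    ∀ (L : List β) (p : List String),
      L.foldl (fun acc x => if cond x then acc else acc ++ h x) p
        = p ++ L.foldl (fun acc x => if cond x then acc else acc ++ h x) [] := by
  intro L
  induction L with
  | nil => intro p; simp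
  | cons x L ih =>
    intro p
    rw [List.foldl_cons, List.foldl_cons]
    by_cases hx : cond x = true
    · rw [if_pos hx, if_pos hx]; exact ih p
    · rw [if_neg hx, if_neg hx]
      rw [ih (p ++ h x), ih ([] ++ h x), List.nil_append, List.append_assoc]

-- main invariant: popping one state appends exactly A's result for that state
theorem pvRunB_eq_core :
    ∀ (n : Nat) (u c w : List Char) (st : List (List Char × List Char)) (acc : List String),
      u.length = n →
      pvRunB w ((u, c) :: st) acc = pvRunB w st (acc ++ permutations2p1Core n u c w) := by
  intro n
  induction n with
  | zero =>
    intro u c w st acc hn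
    have hu : u = [] := List.length_eq_zero_iff.mp hn
    subst hu
    rw [pvRunB_cons_nil, permutations2p1Core]
    by_cases hcw : String.ofList c ≠ String.ofList w <;> simp [hcw]
  | succ m ih =>
    intro u c w st acc hn
    have hu : ¬ u = [] := by intro h; subst h; simp at hn
    rw [pvRunB_cons _ _ _ _ _ hu]
    rw [permutations2p1Core]
    simp only [hn]
    -- generalize the loop over an arbitrary index list whose members are < u.length
    have hloop : ∀ (L : List Nat), (∀ i ∈ L, i < u.length) →
        ∀ (st : List (List Char × List Char)) (acc : List String),
        pvRunB w ((L.filterMap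
            (fun i => if c.contains (u.getD i ' ') then none
              else some (u.take i ++ u.drop (i+1), c ++ [u.getD i ' ']))) ++ st) acc
          = pvRunB w st (acc ++ L.foldl
              (fun perms i =>
                if c.contains (u.getD i ' ') then perms
                else perms ++ permutations2p1Core m (u.take i ++ u.drop (i+1)) (c ++ [u.getD i ' ']) w)
              []) := by
      intro L
      induction L with
      | nil => intro _ st acc; simp
      | cons i L ihL =>
        intro hmem st acc
        have hi : i < u.length := hmem i (by simp)
        by_cases hc : c.contains (u.getD i ' ')
        · simp only [List.filterMap_cons, hc, List.foldl_cons, if_pos]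
          exact ihL (fun j hj => hmem j (by simp [hj])) st acc
        · simp only [List.filterMap_cons, hc, List.foldl_cons, if_neg,
            Bool.false_eq_true, not_false_iff, List.cons_append]
          have hclen : (u.take i ++ u.drop (i+1)).length = m := by
            simp [List.length_take, List.length_drop]; omega
          rw [ih _ _ _ _ _ hclen]
          rw [ihL (fun j hj => hmem j (by simp [hj]))]
          rw [pv_foldl_factor (fun i => c.contains (u.getD i ' '))
              (fun i => permutations2p1Core m (u.take i ++ u.drop (i+1)) (c ++ [u.getD i ' ']) w)
              L ([] ++ permutations2p1Core m (u.take i ++ u.drop (i+1)) (c ++ [u.getD i ' ']) w)]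
          simp [List.append_assoc]
    have := hloop (List.range u.length) (fun i hi => List.mem_range.mp hi) st acc
    simpa [pvChildren, hn] using this

-- ===== VERDICT (by name: the statement is the Claim_ definition above) =====
theorem permutations2p1_spec : Claim_equal_permutations2p1 := by
  intro u c w _
  unfold Spec_permutations2p1 permutations2p1 permutations2p1_alt
  rw [pvRunB_eq_core u.toList.length u.toList c.toList w.toList [] [] rfl, pvRunB_nil]
  simp
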